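-- pv_equiv track=rewrite | github.com/pypi-data/pypi-mirror-384 | packages/casmarine/casmarine-1.6.2.tar.gz/casmarine-1.6.2/casmarine/cserial.py | calculate_struct_size
-- ===== SOURCE A (Python) =====
-- def calculate_struct_size(fmt: str) -> int:
--     format_sizes = {
--         'b': 1, 'B': 1,
--         'h': 2, 'H': 2,
--         'i': 4, 'I': 4,
--         'f': 4,
--     }
--
--     total_size = 0
--     i = 0
--     while i < len(fmt):
--         count_str = ''
--         while i < len(fmt) and fmt[i].isdigit():
--             count_str += fmt[i]
--             i += 1
--         count = int(count_str) if count_str else 1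
--
--         if i >= len(fmt):
--             raise ValueError("Invalid format string")
--
--         fmt_char = fmt[i]
--         if fmt_char not in format_sizes:
--             raise ValueError(f"Unknown format character: {fmt_char}")
--         total_size += count * format_sizes[fmt_char]
--         i += 1
--
--     return total_size
-- ===== SOURCE B (Python) =====
-- def calculate_struct_size(fmt: str) -> int:
--     format_sizes = {
--         'b': 1, 'B': 1,
--         'h': 2, 'H': 2,
--         'i': 4, 'I': 4,
--         'f': 4,
--     }
--     total = 0
--     count = 0
--     have_count = False
--     for ch in fmt:
--         if ch.isdigit():
--             count = count * 10 + int(ch)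
--             have_count = True
--         else:
--             size = format_sizes.get(ch)
--             if size is None:
--                 raise ValueError(f"Unknown format character: {ch}")
--             total += (count if have_count else 1) * size
--             count = 0
--             have_count = False
--     if have_count:
--         raise ValueError("Invalid format string")
--     return total
-- ===== Notes on version B (the rewrite author's own statement) =====
-- stated objective: simpler
-- what changed: Replaces A's index-based outer loop with a nested digit-collecting inner while and a string-to-int conversion by a single for-each pass over the characters that folds digit runs into a running count accumulator (a small state machine), checking for a dangling count only once after the loop.
import Mathlib
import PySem

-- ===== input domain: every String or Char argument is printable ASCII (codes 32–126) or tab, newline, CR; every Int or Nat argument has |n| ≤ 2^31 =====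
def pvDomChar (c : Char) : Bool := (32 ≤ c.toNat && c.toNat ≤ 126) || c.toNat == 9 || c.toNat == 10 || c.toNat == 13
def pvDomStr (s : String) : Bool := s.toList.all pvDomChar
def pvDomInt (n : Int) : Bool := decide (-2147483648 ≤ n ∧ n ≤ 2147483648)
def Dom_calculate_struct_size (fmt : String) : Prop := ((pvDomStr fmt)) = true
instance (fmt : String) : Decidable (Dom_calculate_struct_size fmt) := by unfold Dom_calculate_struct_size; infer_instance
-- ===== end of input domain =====

-- B replaces A's index-based nested while loops (digit substring collected, then int()) by a
-- single for-each pass folding digit runs into a running count accumulator: simpler decomposition.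

-- ===== PORT A =====
-- the dict format_sizes (same literal in both Python versions)
def pvFormatSizes : PySem.Dict Char Int :=
  PySem.Dict.ofList [('b', 1), ('B', 1), ('h', 2), ('H', 2), ('i', 4), ('I', 4), ('f', 4)]

-- int(count_str): exact because count_str consists only of characters '0'-'9' by construction
def pvDigitsInt (ds : List Char) : Int :=
  ds.foldl (fun a c => a * 10 + ((c.toNat : Int) - 48)) 0

-- inner while: collect fmt[i].isdigit() characters into count_str, return (count_str, rest)
def pvInnerA : List Char → List Char × List Char
  | [] => ([], [])
  | c :: t =>
    if PySem.Chars.isdigit c then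
      let r := pvInnerA t
      (c :: r.1, r.2)
    else ([], c :: t)

-- outer while over the remaining characters (index i replaced by the remaining suffix;
-- fuel = number of characters left, enough since each iteration consumes at least one character)
def pvLoopA : Nat → List Char → Int → Int
  | 0, _, total => total
  | _ + 1, [], total => total
  | fuel + 1, c0 :: t0, total =>
    let countStr := (pvInnerA (c0 :: t0)).1
    let count : Int := if countStr.isEmpty then 1 else pvDigitsInt countStr
    match (pvInnerA (c0 :: t0)).2 with
    | [] => 0  -- raise ValueError("Invalid format string"); excluded by Pre_
    | c :: rest =>
      if (pvFormatSizes.get? c).isSome then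
        pvLoopA fuel rest (total + count * pvFormatSizes.getD c 0)
      else 0  -- raise ValueError("Unknown format character: ..."); excluded by Pre_

def calculate_struct_size (fmt : String) : Int :=
  pvLoopA fmt.toList.length fmt.toList 0

-- ===== PORT B =====
-- loop body of B: state = none after a raise, else some (total, count, have_count)
def pvStepB (st : Option (Int × Int × Bool)) (ch : Char) : Option (Int × Int × Bool) :=
  match st with
  | none => none
  | some (total, count, hc) =>
    if PySem.Chars.isdigit ch then
      some (total, count * 10 + ((ch.toNat : Int) - 48), true)  -- int(ch): exact, ch is '0'-'9' here
    else
      match pvFormatSizes.get? ch with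
      | none => none  -- raise ValueError("Unknown format character: …"); excluded by Pre_
      | some s => some (total + (if hc then count else 1) * s, 0, false)

def calculate_struct_size_alt (fmt : String) : Int :=
  match fmt.toList.foldl pvStepB (some (0, 0, false)) with
  | none => 0  -- unknown format character; excluded by Pre_
  | some (total, _, hc) =>
    if hc then 0 else total  -- hc: trailing digits, raise ValueError("Invalid format string"); excluded by Pre_

-- ===== PRECONDITION & SPEC =====
-- Pre_ excludes exactly the inputs on which A raises ValueError: a non-digit character outside
-- the format_sizes keys (Unknown format character), or a trailing digit (Invalid format string).
def Pre_calculate_struct_size (fmt : String) : Prop :=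
  fmt.toList.all (fun c => PySem.Chars.isdigit c || ['b', 'B', 'h', 'H', 'i', 'I', 'f'].contains c) = true ∧
  PySem.Chars.isdigit (fmt.toList.getLastD 'b') = false

instance (fmt : String) : Decidable (Pre_calculate_struct_size fmt) := by
  unfold Pre_calculate_struct_size; infer_instance

def pvWitness_calculate_struct_size : String := "2hf"

def Spec_calculate_struct_size (fmt : String) (out : Int) : Prop := out = calculate_struct_size_alt fmt
instance (fmt : String) (out : Int) : Decidable (Spec_calculate_struct_size fmt out) := by unfold Spec_calculate_struct_size; infer_instance

-- ===== CLAIM (what is proved, stated in full; the proofs are below) =====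
def Claim_equal_calculate_struct_size : Prop := ∀ (fmt : String), Dom_calculate_struct_size fmt → Pre_calculate_struct_size fmt → Spec_calculate_struct_size fmt (calculate_struct_size fmt)

-- ===== LEMMAS AND PROOFS =====

-- list-level form of Pre_
def pvPreL (cs : List Char) : Prop :=
  (∀ c ∈ cs, PySem.Chars.isdigit c = true ∨ c ∈ ['b', 'B', 'h', 'H', 'i', 'I', 'f']) ∧
  (∀ d, cs.getLast? = some d → PySem.Chars.isdigit d = false)

theorem pvInnerA_spec (cs : List Char) :
    cs = (pvInnerA cs).1 ++ (pvInnerA cs).2 ∧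
    (∀ d ∈ (pvInnerA cs).1, PySem.Chars.isdigit d = true) ∧
    (∀ c t, (pvInnerA cs).2 = c :: t → PySem.Chars.isdigit c = false) := by
  induction cs with
  | nil => simp [pvInnerA]
  | cons c t ih =>
    by_cases h : PySem.Chars.isdigit c
    · simpa [pvInnerA, h] using ih
    · refine ⟨by simp [pvInnerA, h], by simp [pvInnerA, h], ?_⟩
      intro c' t' hct
      simp [pvInnerA, h] at hct
      rw [← hct.1]
      simpa using h

theorem pvFoldB_digits (ds : List Char) (hds : ∀ d ∈ ds, PySem.Chars.isdigit d = true) :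
    ∀ (t0 k : Int) (hc : Bool),
      ds.foldl pvStepB (some (t0, k, hc)) =
        some (t0, ds.foldl (fun a c => a * 10 + ((c.toNat : Int) - 48)) k,
              if ds.isEmpty then hc else true) := by
  induction ds with
  | nil => simp
  | cons d t ih =>
    intro t0 k hc
    have hd : PySem.Chars.isdigit d = true := hds d (by simp)
    have ht : ∀ x ∈ t, PySem.Chars.isdigit x = true := fun x hx => hds x (by simp [hx])
    by_cases hte : t = []
    · subst hte; simp [pvStepB, hd]
    · simp [pvStepB, hd, ih ht, hte]

theorem pvDigitsInt_shift (ds : List Char) (k : Int) :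
    ds.foldl (fun a c => a * 10 + ((c.toNat : Int) - 48)) k = k * 10 ^ ds.length + pvDigitsInt ds := by
  induction ds generalizing k with
  | nil => simp [pvDigitsInt]
  | cons d t ih =>
    simp only [List.foldl_cons, List.length_cons, pvDigitsInt]
    rw [ih, ih]
    simp only [pvDigitsInt]
    ring

-- Pre_ (boolean, decidable) implies the propositional form the induction uses
theorem pvPre_to_PreL (fmt : String) (h : Pre_calculate_struct_size fmt) : pvPreL fmt.toList := by
  obtain ⟨h1, h2⟩ := h
  constructor
  · intro c hc
    have := List.all_eq_true.mp h1 c hc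
    simpa using this
  · intro d hd
    rw [List.getLastD_eq_getLast?, hd] at h2
    exact h2

theorem pvMain (fuel : Nat) : ∀ (cs : List Char) (t0 : Int), cs.length ≤ fuel → pvPreL cs →
    cs.foldl pvStepB (some (t0, 0, false)) = some (pvLoopA fuel cs t0, 0, false) := by
  induction fuel with
  | zero =>
    intro cs t0 hlen _
    have hn : cs = [] := List.eq_nil_of_length_eq_zero (by omega)
    subst hn
    simp [pvLoopA]
  | succ n ih =>
    intro cs t0 hlen hpre
    rcases cs with _ | ⟨c0, t0'⟩
    · simp [pvLoopA]
    · obtain ⟨heq, hdig, hhead⟩ := pvInnerA_spec (c0 :: t0')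
      rcases hrest : (pvInnerA (c0 :: t0')).2 with _ | ⟨c, rest⟩
      · -- impossible: cs would be a non-empty all-digit string, but its last char is not a digit
        exfalso
        rw [hrest, List.append_nil] at heq
        have hne : (pvInnerA (c0 :: t0')).1 ≠ [] := by rw [← heq]; simp
        have hd := List.getLast_mem (l := (pvInnerA (c0 :: t0')).1) hne
        have hdig' := hdig _ hd
        have hlast : (c0 :: t0').getLast? = some ((pvInnerA (c0 :: t0')).1.getLast hne) := by
          conv_lhs => rw [heq]
          exact List.getLast?_eq_some_getLast hne
        have := hpre.2 _ hlast
        rw [hdig'] at this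
        cases this
      · have hcnd : PySem.Chars.isdigit c = false := hhead c rest hrest
        have hcmem : c ∈ (c0 :: t0') := by rw [heq, hrest]; simp
        have hcal : c ∈ ['b', 'B', 'h', 'H', 'i', 'I', 'f'] := by
          rcases hpre.1 c hcmem with h | h
          · rw [hcnd] at h; cases h
          · exact h
        have hgs : pvFormatSizes.get? c = some (pvFormatSizes.getD c 0) := by
          fin_cases hcal <;> decide
        have hlenr : rest.length ≤ n := by
          have h1 : (c0 :: t0').length = (pvInnerA (c0 :: t0')).1.length + (c :: rest).length := by
            conv_lhs => rw [heq, hrest]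
            simp
          simp only [List.length_cons] at h1 hlen
          omega
        have hprer : pvPreL rest := by
          constructor
          · intro x hx
            exact hpre.1 x (by rw [heq, hrest]; simp [hx])
          · intro d hd
            rcases List.eq_nil_or_concat rest with hnil | ⟨ys, y, hy⟩
            · simp [hnil] at hd
            · rw [List.concat_eq_append] at hy
              have hyd : y = d := by
                rw [hy, List.getLast?_concat] at hd
                exact Option.some.inj hd
              apply hpre.2 d
              rw [heq, hrest, hy, ← hyd]
              rw [show (pvInnerA (c0 :: t0')).1 ++ c :: (ys ++ [y])
                    = ((pvInnerA (c0 :: t0')).1 ++ c :: ys) ++ [y] by simp]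
              exact List.getLast?_concat
        have hval : (pvInnerA (c0 :: t0')).1.foldl (fun a c => a * 10 + ((c.toNat : Int) - 48)) 0
            = pvDigitsInt (pvInnerA (c0 :: t0')).1 := by
          rw [pvDigitsInt_shift]; ring
        -- A's side: one unfolding of the outer while
        have hA : pvLoopA (n + 1) (c0 :: t0') t0 =
            pvLoopA n rest (t0 + (if (pvInnerA (c0 :: t0')).1.isEmpty then 1
                                else pvDigitsInt (pvInnerA (c0 :: t0')).1) * pvFormatSizes.getD c 0) := by
          rw [pvLoopA]
          rw [hrest]
          simp only [hgs, Option.isSome_some, if_true]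
        -- B's side: the digit run, the step at c, then the rest
        conv_lhs => rw [heq, hrest]
        rw [List.foldl_append, pvFoldB_digits _ hdig t0 0 false, hval, List.foldl_cons]
        have hstep : pvStepB (some (t0, pvDigitsInt (pvInnerA (c0 :: t0')).1,
              if (pvInnerA (c0 :: t0')).1.isEmpty then false else true)) c =
            some (t0 + (if (pvInnerA (c0 :: t0')).1.isEmpty then 1
                        else pvDigitsInt (pvInnerA (c0 :: t0')).1) * pvFormatSizes.getD c 0, 0, false) := by
          by_cases hde : (pvInnerA (c0 :: t0')).1.isEmpty
          · have h0 : (pvInnerA (c0 :: t0')).1 = [] := by simpa [List.isEmpty_iff] using hde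
            simp [pvStepB, hcnd, hgs, h0]
          · simp [pvStepB, hcnd, hgs, hde]
        rw [hstep, ih rest _ hlenr hprer, hA]

-- ===== VERDICT (by name: the statement is the Claim_ definition above) =====
theorem calculate_struct_size_spec : Claim_equal_calculate_struct_size := by
  intro fmt _ hpre
  unfold Spec_calculate_struct_size calculate_struct_size calculate_struct_size_alt
  rw [pvMain fmt.toList.length fmt.toList 0 le_rfl (pvPre_to_PreL fmt hpre)]
  simp
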